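-- pv_equiv track=rewrite | github.com/emythiel/cybs-python | python/06_input-validation/security-config-validator.py | validate_output_file
-- ===== SOURCE A (Python) =====
-- def validate_output_file(output_file):
--     if not isinstance(output_file, str):
--         raise ValueError('output_file must be a string')
--     # Sanitize
--     dangerous_chars = '<>:"\\|?*'
--     for char in dangerous_chars:
--         output_file = output_file.replace(char, '_')
--     output_file = output_file.strip('. ')
--
--     return output_file
-- ===== SOURCE B (Python) =====
-- DANGEROUS = set('<>:"\\|?*')
--
-- def validate_output_file(output_file):
--     if not isinstance(output_file, str):
--         raise ValueError('output_file must be a string')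
--     # Single pass: replace each dangerous character as it is seen.
--     sanitized = ''.join('_' if c in DANGEROUS else c for c in output_file)
--     return sanitized.strip('. ')
-- ===== Notes on version B (the rewrite author's own statement) =====
-- stated objective: idiomatic
-- what changed: Replaces the eight sequential full-string .replace passes with one character-by-character pass testing membership in a precomputed set of dangerous characters.
import Mathlib
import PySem

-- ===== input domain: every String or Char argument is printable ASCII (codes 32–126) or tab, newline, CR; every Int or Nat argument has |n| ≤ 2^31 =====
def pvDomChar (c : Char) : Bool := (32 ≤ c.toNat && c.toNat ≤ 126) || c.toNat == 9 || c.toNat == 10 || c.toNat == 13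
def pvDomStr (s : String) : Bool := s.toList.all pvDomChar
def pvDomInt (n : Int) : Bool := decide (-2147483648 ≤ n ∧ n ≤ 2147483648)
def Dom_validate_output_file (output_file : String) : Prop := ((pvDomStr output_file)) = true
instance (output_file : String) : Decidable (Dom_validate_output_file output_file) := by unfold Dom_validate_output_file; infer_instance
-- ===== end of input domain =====

-- B replaces A's eight sequential full-string .replace passes with one single pass
-- over the characters testing membership in a precomputed set (idiomatic, not measurably faster).
-- The isinstance guard of A cannot fire under the type convention (the argument is always a string).

-- ===== PORT A =====
-- A: loop over the 8 dangerous characters, each iteration a full-string replace, then strip('. ').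
def validate_output_file (output_file : String) : String :=
  let dangerous_chars : List Char := "<>:\"\\|?*".toList
  let sanitized := dangerous_chars.foldl
    (fun s c => PySem.Str.replace s (String.ofList [c]) "_") output_file
  PySem.Str.stripChars sanitized ". "

-- ===== PORT B =====
def pvDangerousSet : PySem.Set Char := PySem.Set.ofList "<>:\"\\|?*".toList

-- B: one pass over the characters, substituting '_' on set membership, then strip('. ').
def validate_output_file_alt (output_file : String) : String :=
  let sanitized := String.ofList (output_file.toList.map
    (fun c => if pvDangerousSet.contains c then '_' else c))
  PySem.Str.stripChars sanitized ". "

-- ===== PRECONDITION & SPEC =====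
def Spec_validate_output_file (output_file : String) (out : String) : Prop := out = validate_output_file_alt output_file
instance (output_file : String) (out : String) : Decidable (Spec_validate_output_file output_file out) := by unfold Spec_validate_output_file; infer_instance

-- ===== CLAIM (what is proved, stated in full; the proofs are below) =====
def Claim_equal_validate_output_file : Prop := ∀ (output_file : String), Dom_validate_output_file output_file → Spec_validate_output_file output_file (validate_output_file output_file)

-- ===== LEMMAS AND PROOFS =====

-- one single-character replace is a map over the characters
theorem replace_go_single (d r : Char) :
    ∀ (fuel : Nat) (l acc : List Char), l.length ≤ fuel →
      PySem.Chars.replace.go [d] [r] fuel l acc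
        = acc.reverse ++ l.map (fun c => if c == d then r else c) := by
  intro fuel
  induction fuel with
  | zero =>
    intro l acc h
    have : l = [] := List.eq_nil_of_length_eq_zero (Nat.le_zero.mp h)
    subst this
    simp [PySem.Chars.replace.go]
  | succ n ih =>
    intro l acc h
    cases l with
    | nil => simp [PySem.Chars.replace.go]
    | cons c t =>
      simp only [PySem.Chars.replace.go]
      by_cases hc : c = d
      · subst hc
        have hp : List.isPrefixOf [c] (c :: t) = true := by
          simp [List.isPrefixOf]
        simp only [hp, if_true, List.length_cons, List.length_nil, List.drop,
          List.reverse_cons, List.reverse_nil, List.nil_append]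
        rw [List.singleton_append, ih t (r :: acc) (Nat.le_of_succ_le_succ h)]
        simp
      · have hp : List.isPrefixOf [d] (c :: t) = false := by
          simp only [List.isPrefixOf, Bool.and_eq_false_iff, beq_eq_false_iff_ne, ne_eq]
          left
          exact fun h' => hc (Eq.symm h')
        simp only [hp, Bool.false_eq_true, if_false]
        rw [ih t (c :: acc) (Nat.le_of_succ_le_succ h)]
        simp [hc]

theorem replace_single_eq_map (s : List Char) (d r : Char) :
    PySem.Chars.replace s [d] [r] = s.map (fun c => if c == d then r else c) := by
  rw [PySem.Chars.replace]
  rw [if_neg (by simp)]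
  exact replace_go_single d r s.length s [] le_rfl

-- the chain of eight per-character substitutions equals one membership test
theorem chain_char (c : Char) :
    (List.foldl (fun x d => if x == d then '_' else x) c "<>:\"\\|?*".toList)
      = (if pvDangerousSet.contains c then '_' else c) := by
  have hset : pvDangerousSet = ['<', '>', ':', '"', '\\', '|', '?', '*'] := by decide
  by_cases h1 : c = '<'; · subst h1; decide
  by_cases h2 : c = '>'; · subst h2; decide
  by_cases h3 : c = ':'; · subst h3; decide
  by_cases h4 : c = '"'; · subst h4; decide
  by_cases h5 : c = '\\'; · subst h5; decide
  by_cases h6 : c = '|'; · subst h6; decide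
  by_cases h7 : c = '?'; · subst h7; decide
  by_cases h8 : c = '*'; · subst h8; decide
  simp [hset, PySem.Set.contains, List.foldl, h1, h2, h3, h4, h5, h6, h7, h8]

-- A's fold of replaces is B's single map
theorem fold_replace_eq_map (l : List Char) :
    List.foldl (fun s c => PySem.Chars.replace s [c] ['_']) l "<>:\"\\|?*".toList
      = l.map (fun c => if pvDangerousSet.contains c then '_' else c) := by
  have h : ∀ (ds : List Char) (l : List Char),
      List.foldl (fun s c => PySem.Chars.replace s [c] ['_']) l ds
        = l.map (fun c => List.foldl (fun x d => if x == d then '_' else x) c ds) := by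
    intro ds
    induction ds with
    | nil => intro l; simp
    | cons d t ih =>
      intro l
      rw [List.foldl_cons, replace_single_eq_map, ih, List.map_map]
      simp only [List.foldl_cons]
      rfl
  rw [h]
  exact List.map_congr_left (fun c _ => chain_char c)

-- ===== VERDICT (by name: the statement is the Claim_ definition above) =====
theorem validate_output_file_spec : Claim_equal_validate_output_file := by
  intro s _
  show validate_output_file s = validate_output_file_alt s
  unfold validate_output_file validate_output_file_alt
  have key : ∀ (ds : List Char) (str : String),
      List.foldl (fun s c => PySem.Str.replace s (String.ofList [c]) "_") str ds
        = String.ofList (List.foldl (fun l c => PySem.Chars.replace l [c] ['_']) str.toList ds) := by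
    intro ds
    induction ds with
    | nil => intro str; simp
    | cons d t ih =>
      intro str
      rw [List.foldl_cons, List.foldl_cons, ih]
      congr 1
      simp [PySem.Str.replace]
  simp only [key, fold_replace_eq_map]
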